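-- pv_equiv track=rewrite | github.com/VKrishna04/My-DSA-Life | problems/lc-shift-distance-between-two-strings::1460841171/lc-shift-distance-between-two-strings::1460841171.py | shiftDistance
-- ===== SOURCE A (Python) =====
-- from typing import List
--
-- def shiftDistance(s: str, t: str, nextCost: List[int], previousCost: List[int]) -> int:
--     totalc = 0
--     alfa = 26
--
--     for chars, chart in zip(s,t):
--         start = ord(chars) - ord('a')
--         target = ord(chart) - ord('a')
--
--         forward = (target - start) % alfa
--         backward = (start - target) % alfa
--
--         forwardc = sum(nextCost[(start + i) % alfa] for i in range(forward))
--         backwardc = sum(previousCost[(start - i) % alfa] for i in range(backward))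
--
--         totalc += min(forwardc, backwardc)
--     return totalc
-- ===== SOURCE B (Python) =====
-- def _prefix26(costs):
--     # P[k] = sum of costs[0..k-1] for k in 0..26; a missing entry counts as 0
--     P = [0] * 27
--     for k in range(26):
--         P[k + 1] = P[k] + (costs[k] if k < len(costs) else 0)
--     return P
--
-- def shiftDistance(s, t, nextCost, previousCost):
--     P = _prefix26(nextCost)
--     Q = _prefix26(previousCost)
--     total = 0
--     for cs, ct in zip(s, t):
--         a = (ord(cs) - 97) % 26
--         d = (ord(ct) - ord(cs)) % 26          # forward steps
--         b = (26 - d) % 26                     # backward steps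
--         fcost = P[a + d] - P[a] if a + d <= 26 else P[26] - P[a] + P[a + d - 26]
--         bcost = Q[a + 1] - Q[a + 1 - b] if b <= a + 1 else Q[a + 1] + Q[26] - Q[a + 1 - b + 26]
--         total += min(fcost, bcost)
--     return total
-- ===== Notes on version B (the rewrite author's own statement) =====
-- stated objective: faster
-- what changed: Replaces A's per-character O(26) generator sums by two precomputed circular prefix-sum tables over the 26 costs, answering each character's forward/backward cost in O(1).
import Mathlib
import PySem

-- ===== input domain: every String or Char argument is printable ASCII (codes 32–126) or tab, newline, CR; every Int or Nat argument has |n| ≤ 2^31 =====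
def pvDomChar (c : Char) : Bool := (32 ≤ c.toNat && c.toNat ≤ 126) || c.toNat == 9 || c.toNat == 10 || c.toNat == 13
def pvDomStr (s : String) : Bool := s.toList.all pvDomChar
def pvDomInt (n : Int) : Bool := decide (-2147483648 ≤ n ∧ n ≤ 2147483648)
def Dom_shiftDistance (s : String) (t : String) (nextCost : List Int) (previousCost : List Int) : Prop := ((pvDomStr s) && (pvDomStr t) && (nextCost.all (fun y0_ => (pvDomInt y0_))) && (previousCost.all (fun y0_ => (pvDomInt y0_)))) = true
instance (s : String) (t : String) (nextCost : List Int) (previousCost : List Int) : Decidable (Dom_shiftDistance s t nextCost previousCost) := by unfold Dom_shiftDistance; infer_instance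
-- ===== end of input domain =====

-- B replaces A's per-character O(26) generator sums by two prefix-sum tables over the
-- 26 costs, answering each character's forward/backward cost in O(1).

-- ===== PORT A =====
-- literal transliteration of Source A: for each zipped pair, sum the next/previous costs
-- step by step around the circle and add the cheaper direction.
def shiftDistance (s : String) (t : String) (nextCost : List Int) (previousCost : List Int) : Int :=
  (s.toList.zip t.toList).foldl
    (fun totalc p =>
      let start : Int := (p.1.toNat : Int) - 97
      let target : Int := (p.2.toNat : Int) - 97
      let forward := PySem.Int.mod (target - start) 26
      let backward := PySem.Int.mod (start - target) 26
      let forwardc := ((PySem.List.pyRange 0 forward 1).map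
          (fun i => PySem.List.pyGetD nextCost (PySem.Int.mod (start + i) 26) 0)).sum
      let backwardc := ((PySem.List.pyRange 0 backward 1).map
          (fun i => PySem.List.pyGetD previousCost (PySem.Int.mod (start - i) 26) 0)).sum
      totalc + min forwardc backwardc)
    0

-- ===== PORT B =====
-- Source B's prefix table P (a 27-entry list there) ported as the function k ↦ P[k];
-- pyGetD costs k 0 is exactly Source B's "costs[k] if k < len(costs) else 0".
def pvPref26 (costs : List Int) : Nat → Int
  | 0 => 0
  | k + 1 => pvPref26 costs k + PySem.List.pyGetD costs (k : Int) 0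

-- literal transliteration of Source B: prefix sums once, O(1) per character pair.
def shiftDistance_alt (s : String) (t : String) (nextCost : List Int) (previousCost : List Int) : Int :=
  let P := pvPref26 nextCost
  let Q := pvPref26 previousCost
  (s.toList.zip t.toList).foldl
    (fun total p =>
      let a : Nat := (PySem.Int.mod ((p.1.toNat : Int) - 97) 26).toNat
      let d : Nat := (PySem.Int.mod ((p.2.toNat : Int) - (p.1.toNat : Int)) 26).toNat
      let b : Nat := (26 - d) % 26
      let fcost := if a + d ≤ 26 then P (a + d) - P a
                   else P 26 - P a + P (a + d - 26)
      -- Source B's Q[a+1-b+26] is written a+27-b (same value; Nat subtraction stays in range this way)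
      let bcost := if b ≤ a + 1 then Q (a + 1) - Q (a + 1 - b)
                   else Q (a + 1) + Q 26 - Q (a + 27 - b)
      total + min fcost bcost)
    0

-- ===== PRECONDITION & SPEC =====
-- Pre_ admits exactly the inputs whose accessed cost entries exist: for every character
-- pair that needs a shift, each cost table is long enough to contain every index the
-- circular walk reads (always true for the problem contract's 26-entry tables).
-- pvPairOK lenN lenP p: the pair p's forward walk stays inside a table of length lenN
-- and its backward walk inside one of length lenP.
def pvPairOK (lenN : Nat) (lenP : Nat) (p : Char × Char) : Bool :=
  let a : Nat := (PySem.Int.mod ((p.1.toNat : Int) - 97) 26).toNat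
  let d : Nat := (PySem.Int.mod ((p.2.toNat : Int) - (p.1.toNat : Int)) 26).toNat
  let b : Nat := (26 - d) % 26
  d == 0 ||
    ((if a + d ≤ 26 then decide (a + d ≤ lenN) else decide (26 ≤ lenN)) &&
     (if b ≤ a + 1 then decide (a + 1 ≤ lenP) else decide (26 ≤ lenP)))

def Pre_shiftDistance (s : String) (t : String) (nextCost : List Int) (previousCost : List Int) : Prop :=
  ∀ p ∈ s.toList.zip t.toList, pvPairOK nextCost.length previousCost.length p = true
instance (s : String) (t : String) (nextCost : List Int) (previousCost : List Int) : Decidable (Pre_shiftDistance s t nextCost previousCost) := by unfold Pre_shiftDistance; infer_instance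

def pvWitness_shiftDistance : String × String × List Int × List Int :=
  ("ab", "zc",
   [1,2,3,4,5,6,7,8,9,10,11,12,13,14,15,16,17,18,19,20,21,22,23,24,25,26],
   [26,25,24,23,22,21,20,19,18,17,16,15,14,13,12,11,10,9,8,7,6,5,4,3,2,1])

def Spec_shiftDistance (s : String) (t : String) (nextCost : List Int) (previousCost : List Int) (out : Int) : Prop := out = shiftDistance_alt s t nextCost previousCost
instance (s : String) (t : String) (nextCost : List Int) (previousCost : List Int) (out : Int) : Decidable (Spec_shiftDistance s t nextCost previousCost out) := by unfold Spec_shiftDistance; infer_instance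

-- ===== CLAIM (what is proved, stated in full; the proofs are below) =====
def Claim_equal_shiftDistance : Prop := ∀ (s : String) (t : String) (nextCost : List Int) (previousCost : List Int), Dom_shiftDistance s t nextCost previousCost → Pre_shiftDistance s t nextCost previousCost → Spec_shiftDistance s t nextCost previousCost (shiftDistance s t nextCost previousCost)

-- ===== LEMMAS AND PROOFS =====

theorem pvPref26_succ (costs : List Int) (k : Nat) :
    pvPref26 costs (k + 1) = pvPref26 costs k + PySem.List.pyGetD costs (k : Int) 0 := rfl

-- Forward circular sum: A's step-by-step sum over range(n) equals B's prefix formula.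
theorem fwd_sum (L : List Int) (st : Int) (a n : Nat)
    (ha : PySem.Int.mod st 26 = (a : Int)) (han : a < 26) (hn : n ≤ 26) :
    ((PySem.List.pyRange 0 (n : Int) 1).map
        (fun i => PySem.List.pyGetD L (PySem.Int.mod (st + i) 26) 0)).sum
      = (if a + n ≤ 26 then pvPref26 L (a + n) - pvPref26 L a
         else pvPref26 L 26 - pvPref26 L a + pvPref26 L (a + n - 26)) := by
  induction n with
  | zero => rw [if_pos (by omega)]; simp [pysem]
  | succ m ih =>
    have hm : m ≤ 26 := by omega
    have hstep : PySem.Int.mod (st + (m : Int)) 26 = (((a + m) % 26 : Nat) : Int) := by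
      rw [PySem.Int.mod_eq_emod_of_pos (by norm_num)] at ha ⊢
      push_cast
      omega
    rw [show ((↑(m + 1) : Int)) = (m : Int) + 1 by push_cast; ring,
        PySem.List.pyRange_one_succ_right (by positivity)]
    rw [List.map_append, List.sum_append, ih hm]
    simp only [List.map_cons, List.map_nil, List.sum_cons, List.sum_nil, add_zero, hstep]
    by_cases h1 : a + (m + 1) ≤ 26
    · rw [if_pos (by omega), if_pos h1, show (a + m) % 26 = a + m by omega]
      have e : pvPref26 L (a + (m + 1))
          = pvPref26 L (a + m) + PySem.List.pyGetD L ((a + m : Nat) : Int) 0 := by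
        rw [show a + (m + 1) = (a + m) + 1 by omega]; exact pvPref26_succ L (a + m)
      linarith [e]
    · by_cases h2 : a + m ≤ 26
      · -- the step from index 25 wraps to index 0
        rw [if_pos h2, if_neg h1, show (a + m) % 26 = 0 by omega, show a + m = 26 by omega]
        have e : pvPref26 L (a + (m + 1) - 26)
            = pvPref26 L 0 + PySem.List.pyGetD L ((0 : Nat) : Int) 0 := by
          rw [show a + (m + 1) - 26 = 0 + 1 by omega]; exact pvPref26_succ L 0
        have e0 : pvPref26 L 0 = 0 := rfl
        linarith [e, e0]
      · rw [if_neg h2, if_neg (by omega), show (a + m) % 26 = a + m - 26 by omega]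
        have e : pvPref26 L (a + (m + 1) - 26)
            = pvPref26 L (a + m - 26) + PySem.List.pyGetD L ((a + m - 26 : Nat) : Int) 0 := by
          rw [show a + (m + 1) - 26 = (a + m - 26) + 1 by omega]; exact pvPref26_succ L (a + m - 26)
        linarith [e]

-- Backward circular sum: A's step-by-step sum over range(m) equals B's prefix formula.
theorem bwd_sum (L : List Int) (st : Int) (a m : Nat)
    (ha : PySem.Int.mod st 26 = (a : Int)) (han : a < 26) (hm : m ≤ 26) :
    ((PySem.List.pyRange 0 (m : Int) 1).map
        (fun i => PySem.List.pyGetD L (PySem.Int.mod (st - i) 26) 0)).sum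
      = (if m ≤ a + 1 then pvPref26 L (a + 1) - pvPref26 L (a + 1 - m)
         else pvPref26 L (a + 1) + pvPref26 L 26 - pvPref26 L (a + 27 - m)) := by
  induction m with
  | zero => rw [if_pos (by omega)]; simp [pysem]
  | succ m ih =>
    have hm' : m ≤ 26 := by omega
    rw [show ((↑(m + 1) : Int)) = (m : Int) + 1 by push_cast; ring,
        PySem.List.pyRange_one_succ_right (by positivity)]
    rw [List.map_append, List.sum_append, ih hm']
    by_cases h1 : m ≤ a
    · have hstep : PySem.Int.mod (st - (m : Int)) 26 = ((a - m : Nat) : Int) := by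
        rw [PySem.Int.mod_eq_emod_of_pos (by norm_num)] at ha ⊢
        push_cast [Nat.cast_sub h1]
        omega
      simp only [List.map_cons, List.map_nil, List.sum_cons, List.sum_nil, add_zero, hstep]
      rw [if_pos (by omega), if_pos (by omega), show a + 1 - (m + 1) = a - m by omega]
      have e : pvPref26 L (a + 1 - m)
          = pvPref26 L (a - m) + PySem.List.pyGetD L ((a - m : Nat) : Int) 0 := by
        rw [show a + 1 - m = (a - m) + 1 by omega]; exact pvPref26_succ L (a - m)
      linarith [e]
    · have hstep : PySem.Int.mod (st - (m : Int)) 26 = ((a + 26 - m : Nat) : Int) := by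
        rw [PySem.Int.mod_eq_emod_of_pos (by norm_num)] at ha ⊢
        push_cast [Nat.cast_sub (show m ≤ a + 26 by omega)]
        omega
      simp only [List.map_cons, List.map_nil, List.sum_cons, List.sum_nil, add_zero, hstep]
      by_cases h2 : m ≤ a + 1
      · -- m = a + 1: the step wraps past index 0, picking up L[25]
        rw [if_pos h2, if_neg (by omega), show a + 1 - m = 0 by omega,
            show a + 27 - (m + 1) = 25 by omega, show a + 26 - m = 25 by omega]
        have e : pvPref26 L 26 = pvPref26 L 25 + PySem.List.pyGetD L ((25 : Nat) : Int) 0 := by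
          rw [show (26 : Nat) = 25 + 1 by norm_num]; exact pvPref26_succ L 25
        have e0 : pvPref26 L 0 = 0 := rfl
        linarith [e, e0]
      · rw [if_neg h2, if_neg (by omega), show a + 27 - (m + 1) = a + 26 - m by omega]
        have e : pvPref26 L (a + 27 - m)
            = pvPref26 L (a + 26 - m) + PySem.List.pyGetD L ((a + 26 - m : Nat) : Int) 0 := by
          rw [show a + 27 - m = (a + 26 - m) + 1 by omega]; exact pvPref26_succ L (a + 26 - m)
        linarith [e]

-- The two per-character step functions agree on every accumulator and character pair.
theorem step_eq (N P : List Int) (total : Int) (p : Char × Char) :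
    (let start : Int := (p.1.toNat : Int) - 97
     let target : Int := (p.2.toNat : Int) - 97
     let forward := PySem.Int.mod (target - start) 26
     let backward := PySem.Int.mod (start - target) 26
     let forwardc := ((PySem.List.pyRange 0 forward 1).map
         (fun i => PySem.List.pyGetD N (PySem.Int.mod (start + i) 26) 0)).sum
     let backwardc := ((PySem.List.pyRange 0 backward 1).map
         (fun i => PySem.List.pyGetD P (PySem.Int.mod (start - i) 26) 0)).sum
     total + min forwardc backwardc)
    = (let a : Nat := (PySem.Int.mod ((p.1.toNat : Int) - 97) 26).toNat
       let d : Nat := (PySem.Int.mod ((p.2.toNat : Int) - (p.1.toNat : Int)) 26).toNat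
       let b : Nat := (26 - d) % 26
       let fcost := if a + d ≤ 26 then pvPref26 N (a + d) - pvPref26 N a
                    else pvPref26 N 26 - pvPref26 N a + pvPref26 N (a + d - 26)
       let bcost := if b ≤ a + 1 then pvPref26 P (a + 1) - pvPref26 P (a + 1 - b)
                    else pvPref26 P (a + 1) + pvPref26 P 26 - pvPref26 P (a + 27 - b)
       total + min fcost bcost) := by
  simp only []
  set st : Int := (p.1.toNat : Int) - 97 with hst
  set tg : Int := (p.2.toNat : Int) - 97 with htg
  have hdiff : (p.2.toNat : Int) - (p.1.toNat : Int) = tg - st := by rw [hst, htg]; ring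
  set a : Nat := (PySem.Int.mod st 26).toNat with hadef
  have ha : PySem.Int.mod st 26 = (a : Int) :=
    (Int.toNat_of_nonneg (PySem.Int.mod_nonneg st (by norm_num))).symm
  have han : a < 26 := by
    have := PySem.Int.mod_lt st (b := 26) (by norm_num)
    omega
  set d : Nat := (PySem.Int.mod ((p.2.toNat : Int) - (p.1.toNat : Int)) 26).toNat with hddef
  have hd : PySem.Int.mod (tg - st) 26 = (d : Int) := by
    rw [← hdiff]
    exact (Int.toNat_of_nonneg (PySem.Int.mod_nonneg _ (by norm_num))).symm
  have hdn : d ≤ 26 := by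
    have := PySem.Int.mod_lt ((p.2.toNat : Int) - (p.1.toNat : Int)) (b := 26) (by norm_num)
    omega
  have hb : PySem.Int.mod (st - tg) 26 = (((26 - d) % 26 : Nat) : Int) := by
    rw [PySem.Int.mod_eq_emod_of_pos (by norm_num)] at hd ⊢
    push_cast
    omega
  have hbn : (26 - d) % 26 ≤ 26 := by omega
  rw [hd, hb, fwd_sum N st a d ha han hdn, bwd_sum P st a ((26 - d) % 26) ha han hbn]

-- ===== VERDICT (by name: the statement is the Claim_ definition above) =====
theorem shiftDistance_spec : Claim_equal_shiftDistance := by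
  intro s t nextCost previousCost _ _
  unfold Spec_shiftDistance shiftDistance shiftDistance_alt
  simp only []
  congr 1
  funext total p
  exact step_eq nextCost previousCost total p
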